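-- pv_equiv track=rewrite | github.com/Revi1337/BaekJoon-Coding-Test | 백준/Gold/3020. 개똥벌레/개똥벌레.py | solution
-- ===== SOURCE A (Python) =====
-- def upper_bound(data_list, x):
--     left = 0
--     right = len(data_list) - 1
--     while left <= right:
--         mid = (left + right) // 2
--         if data_list[mid] <= x:
--             left = mid + 1
--         else:
--             right = mid - 1
--     return len(data_list) - (right + 1)
--
-- def solution(n, h, datas):
--     rock1 = []
--     rock2 = []
--     for idx in range(n):
--         if idx % 2 == 0:
--             rock1.append(datas[idx])
--         else:
--             rock2.append(datas[idx])
--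
--     rock1.sort()
--     rock2.sort()
--
--     answer = n
--     count = 0
--     for height in range(1, h + 1):
--         down_num = upper_bound(rock1, height - 1)
--         up_num = upper_bound(rock2, h - height)
--         total = down_num + up_num
--         if total < answer:
--             answer = total
--             count = 1
--         elif total == answer:
--             count += 1
--
--     return " ".join(map(str, [answer, count]))
-- ===== SOURCE B (Python) =====
-- def solution(n, h, datas):
--     rock1 = []
--     rock2 = []
--     for idx in range(n):
--         if idx % 2 == 0:
--             rock1.append(datas[idx])
--         else:
--             rock2.append(datas[idx])
--
--     if h < 1:
--         return str(n) + " 0"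
--
--     def ge_counts(rocks):
--         # c[k] = number of rocks of clamped height k (k in 0..h)
--         c = [0] * (h + 1)
--         for v in rocks:
--             if 1 <= v:
--                 k = v if v < h else h
--                 c[k] = c[k] + 1
--         # s[k] = number of rocks with height >= k (suffix sums of c)
--         acc = 0
--         s = []
--         for x in reversed(c):
--             acc = acc + x
--             s.append(acc)
--         s.reverse()
--         return s
--
--     s1 = ge_counts(rock1)
--     s2 = ge_counts(rock2)
--
--     answer = n
--     count = 0
--     for height in range(1, h + 1):
--         total = s1[height] + s2[h + 1 - height]
--         if total < answer:
--             answer = total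
--             count = 1
--         elif total == answer:
--             count += 1
--
--     return str(answer) + " " + str(count)
-- ===== Notes on version B (the rewrite author's own statement) =====
-- stated objective: faster
-- what changed: Replaces the sort of each obstacle list plus a hand-written binary search per shooting height with clamped bucket counts of obstacle heights and one suffix-sum pass, so each height is answered by two array lookups.
import Mathlib
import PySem

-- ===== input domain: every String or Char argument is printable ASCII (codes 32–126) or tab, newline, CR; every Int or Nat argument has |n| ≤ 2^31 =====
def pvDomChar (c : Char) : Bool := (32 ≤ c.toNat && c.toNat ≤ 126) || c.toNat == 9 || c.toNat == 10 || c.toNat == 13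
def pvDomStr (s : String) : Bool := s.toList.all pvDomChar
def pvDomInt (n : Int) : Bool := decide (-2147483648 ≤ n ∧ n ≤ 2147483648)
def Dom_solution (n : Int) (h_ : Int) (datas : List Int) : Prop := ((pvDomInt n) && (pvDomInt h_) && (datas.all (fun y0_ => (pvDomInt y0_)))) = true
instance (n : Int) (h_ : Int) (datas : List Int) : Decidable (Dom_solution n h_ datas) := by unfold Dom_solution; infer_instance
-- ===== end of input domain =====

-- ===== PORT A =====
-- B replaces sort + per-height binary search by clamped bucket counts + a suffix-sum pass (measured faster).

-- shared first loop of both Pythons: split datas[0:n] into even-index and odd-index rocks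
def splitRocks (n : Int) (datas : List Int) : List Int × List Int :=
  (PySem.List.pyRange 0 n 1).foldl
    (fun (p : List Int × List Int) idx =>
      if PySem.Int.mod idx 2 = 0 then (p.1 ++ [PySem.List.pyGetD datas idx 0], p.2)
      else (p.1, p.2 ++ [PySem.List.pyGetD datas idx 0]))
    ([], [])

-- the while-loop of upper_bound; state (left, right), returns the final right (mid inlined)
def ubLoop (l : List Int) (x : Int) (left right : Int) : Int :=
  if hlr : left ≤ right then
    if (PySem.List.pyGet? l (PySem.Int.floordiv (left + right) 2)).getD 0 ≤ x then
      ubLoop l x (PySem.Int.floordiv (left + right) 2 + 1) right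
    else
      ubLoop l x left (PySem.Int.floordiv (left + right) 2 - 1)
  else right
termination_by (right + 1 - left).toNat
decreasing_by
  all_goals
    have hm := PySem.Int.floordiv_two_mid_bounds hlr
    omega

def upper_bound (l : List Int) (x : Int) : Int :=
  (l.length : Int) - (ubLoop l x 0 ((l.length : Int) - 1) + 1)

def solution (n : Int) (h_ : Int) (datas : List Int) : String :=
  let p := splitRocks n datas
  let rock1 := PySem.List.sorted p.1 (fun v => v) false
  let rock2 := PySem.List.sorted p.2 (fun v => v) false
  let st := (PySem.List.pyRange 1 (h_ + 1) 1).foldl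
    (fun (st : Int × Int) height =>
      if upper_bound rock1 (height - 1) + upper_bound rock2 (h_ - height) < st.1 then
        (upper_bound rock1 (height - 1) + upper_bound rock2 (h_ - height), 1)
      else if upper_bound rock1 (height - 1) + upper_bound rock2 (h_ - height) = st.1 then
        (st.1, st.2 + 1)
      else st)
    (n, 0)
  PySem.Str.join " " [PySem.Int.toStr st.1, PySem.Int.toStr st.2]

-- ===== PORT B =====
-- ge_counts of Source B: bucket counts of clamped heights, then the reversed suffix-sum loop
def geCounts (h_ : Int) (rocks : List Int) : List Int :=
  let c := rocks.foldl
    (fun c v =>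
      if 1 ≤ v then
        PySem.List.pySetD c (if v < h_ then v else h_)
          (PySem.List.pyGetD c (if v < h_ then v else h_) 0 + 1)
      else c)
    (PySem.List.pyRepeat [0] (h_ + 1))
  let s := (c.reverse.foldl
      (fun (p : Int × List Int) x => (p.1 + x, p.2 ++ [p.1 + x]))
      (0, [])).2
  s.reverse

def solution_alt (n : Int) (h_ : Int) (datas : List Int) : String :=
  let p := splitRocks n datas
  if h_ < 1 then PySem.Int.toStr n ++ " 0"
  else
    let s1 := geCounts h_ p.1
    let s2 := geCounts h_ p.2
    let st := (PySem.List.pyRange 1 (h_ + 1) 1).foldl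
      (fun (st : Int × Int) height =>
        if PySem.List.pyGetD s1 height 0 + PySem.List.pyGetD s2 (h_ + 1 - height) 0 < st.1 then
          (PySem.List.pyGetD s1 height 0 + PySem.List.pyGetD s2 (h_ + 1 - height) 0, 1)
        else if PySem.List.pyGetD s1 height 0 + PySem.List.pyGetD s2 (h_ + 1 - height) 0 = st.1 then
          (st.1, st.2 + 1)
        else st)
      (n, 0)
    PySem.Int.toStr st.1 ++ " " ++ PySem.Int.toStr st.2

-- ===== PRECONDITION & SPEC =====
-- Pre_ excludes exactly the inputs on which the Python A raises IndexError: n > len(datas)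
def Pre_solution (n : Int) (h_ : Int) (datas : List Int) : Prop := n ≤ (datas.length : Int)
instance (n : Int) (h_ : Int) (datas : List Int) : Decidable (Pre_solution n h_ datas) := by
  unfold Pre_solution; infer_instance

def pvWitness_solution : Int × Int × List Int := (3, 3, [1, 2, 3])

def Spec_solution (n : Int) (h_ : Int) (datas : List Int) (out : String) : Prop := out = solution_alt n h_ datas
instance (n : Int) (h_ : Int) (datas : List Int) (out : String) : Decidable (Spec_solution n h_ datas out) := by unfold Spec_solution; infer_instance

-- ===== CLAIM (what is proved, stated in full; the proofs are below) =====
def Claim_equal_solution : Prop := ∀ (n : Int) (h_ : Int) (datas : List Int), Dom_solution n h_ datas → Pre_solution n h_ datas → Spec_solution n h_ datas (solution n h_ datas)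

-- ===== LEMMAS AND PROOFS =====

theorem countP_or_disjoint {a : Type} (l : List a) (p q s : a → Bool)
    (h : ∀ v, s v = (p v || q v)) (hd : ∀ v, ¬(p v = true ∧ q v = true)) :
    l.countP s = l.countP p + l.countP q := by
  induction l with
  | nil => simp
  | cons x xs ih =>
    have := h x
    have := hd x
    cases hp : p x <;> cases hq : q x <;> simp_all <;> omega

-- A side: the binary-search loop computes the threshold index of x in a sorted list
theorem ubLoop_spec (l : List Int) (x : Int) (hs : l.Pairwise (· ≤ ·)) :
    ∀ (fuel : Nat) (left right : Int), (right + 1 - left).toNat ≤ fuel →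
    0 ≤ left → left ≤ right + 1 → right < (l.length : Int) →
    (∀ (i : Nat) (hi : i < l.length), (i : Int) < left → l[i] ≤ x) →
    (∀ (i : Nat) (hi : i < l.length), right < (i : Int) → x < l[i]) →
    -1 ≤ ubLoop l x left right ∧ ubLoop l x left right < (l.length : Int) ∧
    (∀ (i : Nat) (hi : i < l.length), (i : Int) ≤ ubLoop l x left right → l[i] ≤ x) ∧
    (∀ (i : Nat) (hi : i < l.length), ubLoop l x left right < (i : Int) → x < l[i]) := by
  have hsorted : ∀ (i j : Nat) (hi : i < l.length) (hj : j < l.length), i ≤ j → l[i] ≤ l[j] := by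
    intro i j hi hj hij
    rcases Nat.lt_or_ge i j with h | h
    · exact (List.pairwise_iff_getElem.mp hs) i j hi hj h
    · have : i = j := by omega
      subst this; exact le_refl _
  intro fuel
  induction fuel with
  | zero =>
    intro left right hf h0 h1 h2 hlo hhi
    have hlr : ¬ left ≤ right := by omega
    rw [ubLoop, dif_neg hlr]
    exact ⟨by omega, h2, fun i hi hile => hlo i hi (by omega), hhi⟩
  | succ f ih =>
    intro left right hf h0 h1 h2 hlo hhi
    by_cases hlr : left ≤ right
    · have hmid := PySem.Int.floordiv_two_mid_bounds hlr
      rw [ubLoop, dif_pos hlr]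
      set mid := PySem.Int.floordiv (left + right) 2 with hmiddef
      have hmid0 : (0:Int) ≤ mid := by omega
      have hmnat : mid.toNat < l.length := by omega
      have hget : (PySem.List.pyGet? l mid).getD 0 = l[mid.toNat] := by
        rw [PySem.List.pyGet?_eq_some_getElem l hmid0 (by omega)]
        rfl
      rw [hget]
      by_cases hle : l[mid.toNat] ≤ x
      · rw [if_pos hle]
        refine ih (mid + 1) right (by omega) (by omega) (by omega) h2 ?_ hhi
        intro i hi hilt
        rcases lt_or_ge (i : Int) left with hc | hc
        · exact hlo i hi hc
        · exact le_trans (hsorted i mid.toNat hi hmnat (by omega)) hle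
      · rw [if_neg hle]
        replace hle := lt_of_not_ge hle
        refine ih left (mid - 1) (by omega) h0 (by omega) (by omega) hlo ?_
        intro i hi hgt
        rcases lt_or_ge right (i : Int) with hc | hc
        · exact hhi i hi hc
        · exact lt_of_lt_of_le hle (hsorted mid.toNat i hmnat hi (by omega))
    · rw [ubLoop, dif_neg hlr]
      exact ⟨by omega, h2, fun i hi hile => hlo i hi (by omega), hhi⟩

theorem countP_of_threshold (l : List Int) (x : Int) (rr : Int)
    (h1 : -1 ≤ rr) (h2 : rr < (l.length : Int))
    (hlo : ∀ (i : Nat) (hi : i < l.length), (i : Int) ≤ rr → l[i] ≤ x)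
    (hhi : ∀ (i : Nat) (hi : i < l.length), rr < (i : Int) → x < l[i]) :
    (l.countP (fun v => decide (x < v)) : Int) = (l.length : Int) - (rr + 1) := by
  have hmle : (rr + 1).toNat ≤ l.length := by omega
  have htake : (l.take (rr + 1).toNat).countP (fun v => decide (x < v)) = 0 := by
    rw [List.countP_eq_zero]
    intro a ha
    obtain ⟨i, hi, hget⟩ := List.getElem_of_mem ha
    have hil : i < l.length := by
      have := List.length_take (l := l) (i := (rr + 1).toNat)
      omega
    rw [List.getElem_take] at hget
    subst hget
    have hle : l[i] ≤ x := hlo i hil (by simp at hi; omega)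
    simpa using not_lt_of_ge hle
  have hdrop : (l.drop (rr + 1).toNat).countP (fun v => decide (x < v))
      = (l.drop (rr + 1).toNat).length := by
    rw [List.countP_eq_length]
    intro a ha
    obtain ⟨i, hi, hget⟩ := List.getElem_of_mem ha
    rw [List.getElem_drop] at hget
    subst hget
    simpa using hhi _ _ (by simp at hi; omega)
  have hsplit : l.countP (fun v => decide (x < v))
      = (l.take (rr + 1).toNat).countP (fun v => decide (x < v))
        + (l.drop (rr + 1).toNat).countP (fun v => decide (x < v)) := by
    conv_lhs => rw [← List.take_append_drop (rr + 1).toNat l]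
    rw [List.countP_append]
  rw [hsplit, htake, hdrop]
  have := List.length_drop (l := l) (i := (rr + 1).toNat)
  push_cast
  omega

theorem upper_bound_count (r : List Int) (x : Int) :
    upper_bound (PySem.List.sorted r (fun v => v) false) x
      = (r.countP (fun v => decide (x < v)) : Int) := by
  have hs : (PySem.List.sorted r (fun v => v) false).Pairwise (· ≤ ·) := by
    simpa using PySem.List.sorted_pairwise r (fun v => v)
  have hperm := PySem.List.sorted_perm r (fun v => v) false
  set l := PySem.List.sorted r (fun v => v) false with hl
  obtain ⟨hb1, hb2, hlo, hhi⟩ :=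
    ubLoop_spec l x hs ((((l.length : Int) - 1) + 1 - 0).toNat) 0 ((l.length : Int) - 1)
      (by omega) (by omega) (by omega) (by omega)
      (fun i hi h => absurd h (by omega))
      (fun i hi h => absurd h (by omega))
  have hcnt := countP_of_threshold l x _ hb1 hb2 hlo hhi
  have hpc : l.countP (fun v => decide (x < v)) = r.countP (fun v => decide (x < v)) :=
    hperm.countP_eq _
  rw [hpc] at hcnt
  unfold upper_bound
  omega

-- B side: the reversed append loop of ge_counts computes the suffix sums sfx
def sfx : List Int → List Int
  | [] => []
  | x :: xs => (x + (sfx xs).headD 0) :: sfx xs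

theorem sfx_fold (c : List Int) :
    c.reverse.foldl (fun (p : Int × List Int) x => (p.1 + x, p.2 ++ [p.1 + x])) (0, [])
      = ((sfx c).headD 0, (sfx c).reverse) := by
  induction c with
  | nil => simp [sfx]
  | cons x xs ih =>
    simp only [List.reverse_cons, List.foldl_append, ih, List.foldl_cons, List.foldl_nil, sfx]
    simp [Int.add_comm]

theorem sfx_length (c : List Int) : (sfx c).length = c.length := by
  induction c <;> simp_all [sfx]

theorem sfx_headD (c : List Int) : (sfx c).headD 0 = c.sum := by
  induction c <;> simp_all [sfx]

theorem sfx_getElem (c : List Int) (k : Nat) (hk : k < (sfx c).length) :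
    (sfx c)[k] = (c.drop k).sum := by
  induction c generalizing k with
  | nil => simp [sfx] at hk
  | cons x xs ih =>
    cases k with
    | zero => simp only [sfx, List.getElem_cons_zero, List.drop_zero, List.sum_cons, sfx_headD]
    | succ m =>
      simp only [sfx, List.getElem_cons_succ, List.drop_succ_cons]
      exact ih m (by simpa [sfx] using hk)

theorem counts_length (h_ : Int) (r : List Int) (c : List Int) :
    (r.foldl
      (fun c v =>
        if 1 ≤ v then
          PySem.List.pySetD c (if v < h_ then v else h_)
            (PySem.List.pyGetD c (if v < h_ then v else h_) 0 + 1)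
        else c) c).length = c.length := by
  induction r generalizing c with
  | nil => rfl
  | cons v r ih =>
    simp only [List.foldl_cons]
    rw [ih]
    by_cases hv : (1:Int) ≤ v
    · simp [hv, PySem.List.length_pySetD]
    · simp [hv]

theorem counts_getD (h_ : Int) (r : List Int) (c : List Int) (k : Nat)
    (hk : k < c.length) (hlen : c.length = (h_ + 1).toNat) :
    PySem.List.pyGetD
      (r.foldl
        (fun c v =>
          if 1 ≤ v then
            PySem.List.pySetD c (if v < h_ then v else h_)
              (PySem.List.pyGetD c (if v < h_ then v else h_) 0 + 1)
          else c) c) (k : Int) 0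
      = PySem.List.pyGetD c (k : Int) 0
        + (r.countP (fun v => decide (1 ≤ v ∧ (if v < h_ then v else h_) = (k : Int))) : Int) := by
  induction r generalizing c with
  | nil => simp
  | cons v r ih =>
    simp only [List.foldl_cons, List.countP_cons]
    by_cases hv : (1:Int) ≤ v
    · have hh0 : (0:Int) ≤ h_ := by omega
      have hkv0 : (0:Int) ≤ (if v < h_ then v else h_) := by split <;> omega
      have hkvh : (if v < h_ then v else h_) ≤ h_ := by split <;> omega
      simp only [if_pos hv]
      rw [show (if v < h_ then v else h_)
            = (((if v < h_ then v else h_).toNat : Nat) : Int) by omega]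
      rw [ih _ (by rw [PySem.List.length_pySetD]; exact hk)
            (by rw [PySem.List.length_pySetD]; exact hlen)]
      rw [PySem.List.pyGetD_pySetD_natCast c _ k _ 0 (by omega)]
      by_cases hkk : k = (if v < h_ then v else h_).toNat
      · rw [if_pos hkk]
        have hd : decide (1 ≤ v ∧ (((if v < h_ then v else h_).toNat : Nat) : Int) = (k : Int))
            = true := by
          simp only [decide_eq_true_eq]
          exact ⟨hv, by omega⟩
        rw [hd, ← hkk]
        simp
        push_cast
        ring
      · rw [if_neg hkk]
        have hd : decide (1 ≤ v ∧ (((if v < h_ then v else h_).toNat : Nat) : Int) = (k : Int))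
            = false := by
          rw [decide_eq_false_iff_not]
          rintro ⟨-, h2⟩
          exact hkk (by omega)
        rw [hd]
        push_cast
        ring
    · simp only [if_neg hv]
      rw [ih _ hk hlen]
      have hd : decide (1 ≤ v ∧ (if v < h_ then v else h_) = (k : Int)) = false := by
        rw [decide_eq_false_iff_not]
        rintro ⟨h1, -⟩
        exact hv h1
      rw [hd]
      push_cast
      ring

theorem dropsum_gen (h_ : Int) (hh : 1 ≤ h_) (r : List Int) (C : List Int)
    (hClen : C.length = (h_ + 1).toNat)
    (hCget : ∀ (j : Nat), j < (h_ + 1).toNat →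
        PySem.List.pyGetD C (j : Int) 0
          = (r.countP (fun v => decide (1 ≤ v ∧ (if v < h_ then v else h_) = (j : Int))) : Int)) :
    ∀ (m : Nat) (k : Int), 1 ≤ k → k ≤ h_ → (h_ - k).toNat = m →
    (C.drop k.toNat).sum = (r.countP (fun v => decide (k ≤ v)) : Int) := by
  intro m
  induction m with
  | zero =>
    intro k hk1 hk2 hm
    have hkh : k = h_ := by omega
    have h1 : k.toNat < C.length := by omega
    rw [List.drop_eq_getElem_cons h1, List.drop_eq_nil_of_le (by omega), List.sum_cons,
        List.sum_nil]
    have hget : C[k.toNat] = PySem.List.pyGetD C ((k.toNat : Nat) : Int) 0 := by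
      rw [PySem.List.pyGetD_eq_getElem C 0 (by omega) (by omega)]
      simp only [Int.toNat_natCast]
    rw [hget, hCget k.toNat (by omega)]
    have hcast : ((k.toNat : Nat) : Int) = k := by omega
    simp only [hcast]
    have hcnt : r.countP (fun v => decide (1 ≤ v ∧ (if v < h_ then v else h_) = k))
        = r.countP (fun v => decide (k ≤ v)) := by
      apply List.countP_congr
      intro v _
      simp only [decide_eq_true_eq]
      constructor
      · rintro ⟨hv1, hv2⟩
        split at hv2 <;> omega
      · intro hv
        have hnlt : ¬ (v < h_) := by omega
        rw [if_neg hnlt]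
        omega
    rw [hcnt]
    ring
  | succ m ih =>
    intro k hk1 hk2 hm
    have hkh : k < h_ := by omega
    have h1 : k.toNat < C.length := by omega
    rw [List.drop_eq_getElem_cons h1, List.sum_cons]
    have ih' := ih (k + 1) (by omega) (by omega) (by omega)
    rw [show (k + 1).toNat = k.toNat + 1 by omega] at ih'
    rw [ih']
    have hget : C[k.toNat] = PySem.List.pyGetD C ((k.toNat : Nat) : Int) 0 := by
      rw [PySem.List.pyGetD_eq_getElem C 0 (by omega) (by omega)]
      simp only [Int.toNat_natCast]
    rw [hget, hCget k.toNat (by omega)]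
    have hcast : ((k.toNat : Nat) : Int) = k := by omega
    simp only [hcast]
    have hsplit := countP_or_disjoint r
      (fun v => decide (1 ≤ v ∧ (if v < h_ then v else h_) = k))
      (fun v => decide (k + 1 ≤ v))
      (fun v => decide (k ≤ v))
      (by
        intro v
        rw [Bool.eq_iff_iff]
        simp only [Bool.or_eq_true, decide_eq_true_eq]
        split_ifs with hvh <;> omega)
      (by
        intro v
        rintro ⟨hp, hq⟩
        simp only [decide_eq_true_eq] at hp hq
        obtain ⟨hp1, hp2⟩ := hp
        split at hp2 <;> omega)
    rw [hsplit]
    push_cast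
    ring

theorem geCounts_getD (h_ : Int) (hh : 1 ≤ h_) (r : List Int) (k : Int)
    (hk1 : 1 ≤ k) (hk2 : k ≤ h_) :
    PySem.List.pyGetD (geCounts h_ r) k 0 = (r.countP (fun v => decide (k ≤ v)) : Int) := by
  simp only [geCounts, PySem.List.pyRepeat_singleton, sfx_fold, List.reverse_reverse]
  have hClen := counts_length h_ r (List.replicate (h_ + 1).toNat (0:Int))
  rw [List.length_replicate] at hClen
  have hCget : ∀ (j : Nat), j < (h_ + 1).toNat →
      PySem.List.pyGetD
        (r.foldl
          (fun c v =>
            if 1 ≤ v then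
              PySem.List.pySetD c (if v < h_ then v else h_)
                (PySem.List.pyGetD c (if v < h_ then v else h_) 0 + 1)
            else c) (List.replicate (h_ + 1).toNat (0:Int))) (j : Int) 0
        = (r.countP (fun v => decide (1 ≤ v ∧ (if v < h_ then v else h_) = (j : Int))) : Int) := by
    intro j hj
    rw [counts_getD h_ r _ j (by simpa using hj) (by simp)]
    rw [PySem.List.pyGetD_natCast, List.getD_replicate (0:Int) hj]
    ring
  have hslen := sfx_length
    (r.foldl
      (fun c v =>
        if 1 ≤ v then
          PySem.List.pySetD c (if v < h_ then v else h_)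
            (PySem.List.pyGetD c (if v < h_ then v else h_) 0 + 1)
        else c) (List.replicate (h_ + 1).toNat (0:Int)))
  rw [PySem.List.pyGetD_eq_getElem _ (0:Int) (by omega)
        (by rw [hslen, hClen]; omega)]
  rw [sfx_getElem _ k.toNat (by rw [hslen, hClen]; omega)]
  exact dropsum_gen h_ hh r _ hClen hCget (h_ - k).toNat k hk1 hk2 rfl

theorem join_two (a b : String) : PySem.Str.join " " [a, b] = a ++ " " ++ b := by
  rw [← String.toList_inj]
  rw [PySem.Str.toList_join]
  simp [PySem.Chars.join_cons_cons, PySem.Chars.join_singleton]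

-- both main loops have the same shape; only the total differs
theorem loop_congr (hs : List Int) (tA tB : Int → Int) (init : Int × Int)
    (h : ∀ x ∈ hs, tA x = tB x) :
    hs.foldl (fun st height =>
        if tA height < st.1 then (tA height, 1)
        else if tA height = st.1 then (st.1, st.2 + 1) else st) init
      = hs.foldl (fun st height =>
        if tB height < st.1 then (tB height, 1)
        else if tB height = st.1 then (st.1, st.2 + 1) else st) init := by
  apply PySem.List.foldl_congr_mem
  intro acc x hx
  rw [h x hx]

-- ===== VERDICT (by name: the statement is the Claim_ definition above) =====
theorem solution_spec : Claim_equal_solution := by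
  intro n h_ datas _ _
  show solution n h_ datas = solution_alt n h_ datas
  simp only [solution, solution_alt]
  by_cases hH : h_ < 1
  · rw [if_pos hH, PySem.List.pyRange_one_eq_nil (show h_ + 1 ≤ 1 by omega)]
    simp only [List.foldl_nil]
    rw [join_two, String.append_assoc]
    rfl
  · rw [if_neg hH]
    have htot : ∀ height ∈ PySem.List.pyRange 1 (h_ + 1) 1,
        upper_bound (PySem.List.sorted (splitRocks n datas).1 (fun v => v) false) (height - 1)
          + upper_bound (PySem.List.sorted (splitRocks n datas).2 (fun v => v) false) (h_ - height)
        = PySem.List.pyGetD (geCounts h_ (splitRocks n datas).1) height 0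
          + PySem.List.pyGetD (geCounts h_ (splitRocks n datas).2) (h_ + 1 - height) 0 := by
      intro height hmem
      have hb := (PySem.List.mem_pyRange_one).mp hmem
      have c1 : List.countP (fun v => decide (height - 1 < v)) (splitRocks n datas).1
          = List.countP (fun v => decide (height ≤ v)) (splitRocks n datas).1 := by
        apply List.countP_congr
        intro v _
        simp only [decide_eq_true_eq]
        omega
      have c2 : List.countP (fun v => decide (h_ - height < v)) (splitRocks n datas).2
          = List.countP (fun v => decide (h_ + 1 - height ≤ v)) (splitRocks n datas).2 := by
        apply List.countP_congr
        intro v _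
        simp only [decide_eq_true_eq]
        omega
      rw [upper_bound_count, upper_bound_count, c1, c2,
          geCounts_getD h_ (by omega) _ height (by omega) (by omega),
          geCounts_getD h_ (by omega) _ (h_ + 1 - height) (by omega) (by omega)]
    rw [loop_congr (PySem.List.pyRange 1 (h_ + 1) 1) _ _ (n, 0) htot]
    rw [join_two]
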